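-- pv_equiv track=rewrite | github.com/JWNimble/CPE-101 | Project 2/wordsearch.py | find_word_up
-- ===== SOURCE A (Python) =====
-- def reverse_string(string: str) -> str:
--     """reverses a given string
--     Args:
--         string (str): the string to be reversed
--     Returns:
--         r_str: the string with its characters reversed
--     """
--
--     str_len = len(string)
--     i = 0
--     r_str = ''
--     while i < str_len:
--         char = string[str_len - 1 - i]
--         r_str += char
--         i += 1
--     return r_str
--
-- def transpose_string(string: str, row_len: int) -> str:
--     """Transposes the characters of a given string
--     Args:
--         string (str): the string to be transposed
--         row_len: the length of a row in the wordsearch puzzle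
--     Returns:
--         tsp_str: a new string with the string's characters transposed
--     """
--
--     str_len = len(string)
--     column = 0
--     tsp_str = ''
--     while column < row_len:
--         row = 0
--         c_str = ''
--         while row < str_len:
--             char = string[column + row]
--             c_str += char
--             row += row_len
--         column += 1
--         tsp_str += c_str
--     return tsp_str
--
-- def find_word_up(puzzle: str, word: str, row_len: int) -> str:
--     """Checks for and finds a word oriented upwards in given wordsearch string
--     Args:
--         puzzle (str): the wordsearch puzzle string
--         word (str): the word to be found oriented upwards in the puzzle
--         row_len (int): the length of a row
--     Returns:
--         the row number and column number of the first character of the word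
--         when oriented upwards
--     """
--
--     puz_len = len(puzzle)
--     col_num = puz_len // row_len
--     tsp_puz = transpose_string(puzzle, row_len)
--     rnt_puz = reverse_string(tsp_puz)
--     i = 0
--     while i < row_len:
--         puz = rnt_puz[puz_len - col_num - (i * col_num):puz_len - (i * col_num)]
--         if puz.find(word) != -1:
--             break
--         i += 1
--     if puz.find(word) != -1:
--         row = col_num - 1 - puz.find(word)
--         column = i
--         return f"{word}: (UP) row: {row} column: {column}"
-- ===== SOURCE B (Python) =====
-- def find_word_up(puzzle: str, word: str, row_len: int) -> str:
--     """Checks for and finds a word oriented upwards in given wordsearch string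
--     (direct column scan: no transpose/reverse preprocessing tables).
--     Like A, raises on row_len <= 0 or a puzzle length not a multiple of row_len."""
--     col_num = len(puzzle) // row_len  # ZeroDivisionError for row_len == 0, as in A
--     if row_len < 0 or len(puzzle) % row_len != 0:
--         raise IndexError("puzzle length must be a multiple of a positive row_len")
--     for i in range(row_len):
--         col = ''.join(puzzle[j * row_len + i] for j in range(col_num - 1, -1, -1))
--         pos = col.find(word)
--         if pos != -1:
--             return f"{word}: (UP) row: {col_num - 1 - pos} column: {i}"
-- ===== Notes on version B (the rewrite author's own statement) =====
-- stated objective: simpler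
-- what changed: B drops A's transpose_string/reverse_string preprocessing (which builds a reversed transposed copy of the whole puzzle by repeated concatenation and then slices blocks out of it) and instead reads each column bottom-to-top directly from the original string by index arithmetic, returning on the first column containing the word; like A, B raises on row_len <= 0 or a puzzle length not a multiple of row_len (those inputs are outside Pre_).
import Mathlib
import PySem

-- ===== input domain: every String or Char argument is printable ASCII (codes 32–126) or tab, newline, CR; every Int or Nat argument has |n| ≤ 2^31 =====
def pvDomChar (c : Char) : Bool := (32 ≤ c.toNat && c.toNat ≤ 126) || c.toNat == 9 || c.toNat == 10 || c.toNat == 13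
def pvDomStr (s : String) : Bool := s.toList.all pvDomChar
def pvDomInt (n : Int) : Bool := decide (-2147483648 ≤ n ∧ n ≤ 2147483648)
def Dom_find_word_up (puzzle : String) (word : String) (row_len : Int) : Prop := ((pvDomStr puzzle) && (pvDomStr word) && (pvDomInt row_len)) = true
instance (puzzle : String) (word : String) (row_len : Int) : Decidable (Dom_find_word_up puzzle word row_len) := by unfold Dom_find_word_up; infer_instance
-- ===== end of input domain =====

-- B replaces A's transpose+reverse preprocessing by a direct bottom-to-top column scan of the puzzle string (objective: simpler).


-- ===== PORT A =====
-- reverse_string's while loop; string[str_len-1-i] is always in range (0 ≤ i < str_len), so pyGetD is exact here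
def pvRevLoop (s : List Char) (strLen : Nat) (i : Nat) (acc : List Char) : List Char :=
  if h : i < strLen then pvRevLoop s strLen (i + 1) (acc ++ [PySem.List.pyGetD s ((strLen : Int) - 1 - (i : Int)) ' ']) else acc
  termination_by strLen - i

def reverse_string (s : List Char) : List Char := pvRevLoop s s.length 0 []

-- transpose_string's inner while loop; the '0 < row_len' conjunct is a totality guard only: Python never
-- reaches the inner loop with row_len ≤ 0 (the outer loop does not run then), and on row_len ≤ 0 it would diverge.
-- string[column+row] may raise IndexError in Python (when row_len does not divide the length); those inputs are outside Pre_.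
def pvTspInner (s : List Char) (strLen row_len column row : Int) (acc : List Char) : List Char :=
  if h : row < strLen ∧ 0 < row_len then
    pvTspInner s strLen row_len column (row + row_len) (acc ++ [PySem.List.pyGetD s (column + row) ' '])
  else acc
  termination_by (strLen - row).toNat
  decreasing_by omega

def pvTspOuter (s : List Char) (strLen row_len column : Int) (acc : List Char) : List Char :=
  if h : column < row_len then
    pvTspOuter s strLen row_len (column + 1) (acc ++ pvTspInner s strLen row_len column 0 [])
  else acc
  termination_by (row_len - column).toNat
  decreasing_by omega

def transpose_string (s : List Char) (row_len : Int) : List Char :=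
  pvTspOuter s (s.length : Int) row_len 0 []

-- the f-string `f"{word}: (UP) row: {row} column: {column}"` (identical in A and B)
def pvFmt (word : List Char) (row column : Int) : String :=
  String.mk (word ++ ": (UP) row: ".toList ++ PySem.Int.toChars row ++ " column: ".toList ++ PySem.Int.toChars column)

-- the main while loop; returns (i, puz) as left by the loop (puz = last slice computed)
def pvFindLoop (rnt word : List Char) (puz_len col_num row_len i : Int) (puz : List Char) : Int × List Char :=
  if h : i < row_len then
    let puz' := PySem.List.slice rnt (some (puz_len - col_num - i * col_num)) (some (puz_len - i * col_num))
    if PySem.Chars.find puz' word ≠ -1 then (i, puz')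
    else pvFindLoop rnt word puz_len col_num row_len (i + 1) puz'
  else (i, puz)
  termination_by (row_len - i).toNat
  decreasing_by omega

def find_word_up (puzzle : String) (word : String) (row_len : Int) : Option String :=
  let puz_len : Int := (PySem.Str.len puzzle : Int)
  let col_num : Int := PySem.Int.floordiv puz_len row_len
  let tsp_puz := transpose_string puzzle.toList row_len
  let rnt_puz := reverse_string tsp_puz
  let res := pvFindLoop rnt_puz word.toList puz_len col_num row_len 0 []
  if PySem.Chars.find res.2 word.toList ≠ -1 then
    some (pvFmt word.toList (col_num - 1 - PySem.Chars.find res.2 word.toList) res.1)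
  else none

-- ===== PORT B =====
-- ''.join(puzzle[j*row_len+i] for j in range(col_num-1, -1, -1)) — column i read bottom-to-top
def pvColUp (puzzle : List Char) (row_len col_num i : Int) : List Char :=
  (PySem.List.pyRange (col_num - 1) (-1) (-1)).map (fun j => PySem.List.pyGetD puzzle (j * row_len + i) ' ')

def pvAltLoop (puzzle word : List Char) (row_len col_num : Int) : List Int → Option String
  | [] => none
  | i :: rest =>
    let col := pvColUp puzzle row_len col_num i
    let pos := PySem.Chars.find col word
    if pos ≠ -1 then some (pvFmt word (col_num - 1 - pos) i)
    else pvAltLoop puzzle word row_len col_num rest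

-- like A, Source B raises on row_len = 0 (ZeroDivisionError) and on row_len < 0 or a non-divisible
-- length (its explicit IndexError); the port returns none at those raise points (outside Pre_).
def find_word_up_alt (puzzle : String) (word : String) (row_len : Int) : Option String :=
  if row_len = 0 then none  -- ZeroDivisionError
  else
    let col_num : Int := PySem.Int.floordiv (PySem.Str.len puzzle : Int) row_len
    if row_len < 0 ∨ PySem.Int.mod (PySem.Str.len puzzle : Int) row_len ≠ 0 then none  -- raise IndexError
    else pvAltLoop puzzle.toList word.toList row_len col_num (PySem.List.pyRange 0 row_len 1)

-- ===== PRECONDITION & SPEC =====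
-- Pre_ excludes exactly the inputs on which A raises: row_len ≤ 0 (ZeroDivisionError / UnboundLocalError)
-- and, for 0 < row_len, lengths not divisible by row_len (IndexError inside transpose_string); B raises there too.
def Pre_find_word_up (puzzle : String) (word : String) (row_len : Int) : Prop :=
  0 < row_len ∧ PySem.Int.mod (PySem.Str.len puzzle : Int) row_len = 0
instance (puzzle : String) (word : String) (row_len : Int) : Decidable (Pre_find_word_up puzzle word row_len) := by unfold Pre_find_word_up; infer_instance

def pvWitness_find_word_up : String × String × Int := ("catdogpig", "ioa", 3)

def Spec_find_word_up (puzzle : String) (word : String) (row_len : Int) (out : Option String) : Prop := out = find_word_up_alt puzzle word row_len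
instance (puzzle : String) (word : String) (row_len : Int) (out : Option String) : Decidable (Spec_find_word_up puzzle word row_len out) := by unfold Spec_find_word_up; infer_instance

-- ===== CLAIM (what is proved, stated in full; the proofs are below) =====
def Claim_equal_find_word_up : Prop := ∀ (puzzle : String) (word : String) (row_len : Int), Dom_find_word_up puzzle word row_len → Pre_find_word_up puzzle word row_len → Spec_find_word_up puzzle word row_len (find_word_up puzzle word row_len)

-- ===== LEMMAS AND PROOFS =====

-- column colIdx of the grid, read top-to-bottom (c rows)
def pvColTD (s : List Char) (row_len : Int) (c : Nat) (colIdx : Int) : List Char :=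
  (List.range c).map (fun (j : Nat) => PySem.List.pyGetD s (colIdx + (j : Int) * row_len) ' ')

lemma pvRevLoop_eq (s : List Char) : ∀ (n i : Nat) (acc : List Char), s.length - i = n →
    pvRevLoop s s.length i acc = acc ++ s.reverse.drop i := by
  intro n
  induction n with
  | zero =>
    intro i acc h
    rw [pvRevLoop]
    have h1 : ¬ i < s.length := by omega
    have h2 : s.reverse.drop i = [] := List.drop_eq_nil_of_le (by simpa using (by omega : s.length ≤ i))
    simp [h1, h2]
  | succ n ih =>
    intro i acc h
    have hi : i < s.length := by omega
    rw [pvRevLoop, dif_pos hi, ih (i + 1) _ (by omega)]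
    have hnn : (0:Int) ≤ (s.length : Int) - 1 - (i : Int) := by omega
    have htn : ((s.length : Int) - 1 - (i : Int)).toNat = s.length - 1 - i := by omega
    have hlt : s.length - 1 - i < s.length := by omega
    have hir : i < s.reverse.length := by simpa using hi
    rw [PySem.List.pyGetD_of_nonneg s ' ' hnn, htn, List.getD_eq_getElem s ' ' hlt,
        List.drop_eq_getElem_cons hir, List.getElem_reverse]
    simp

lemma pvTspInner_eq (s : List Char) (r : Int) (hr : 0 < r) :
    ∀ (m : Nat) (row col : Int) (acc : List Char), 0 ≤ row → row + (m : Int) * r = (s.length : Int) →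
    pvTspInner s (s.length : Int) r col row acc
      = acc ++ (List.range m).map (fun (j : Nat) => PySem.List.pyGetD s (col + row + (j : Int) * r) ' ') := by
  intro m
  induction m with
  | zero =>
    intro row col acc h0 hrow
    rw [pvTspInner]
    have hnot : ¬ (row < (s.length : Int) ∧ 0 < r) := by
      push_cast at hrow; intro hcon; omega
    simp [hnot]
  | succ m ih =>
    intro row col acc h0 hrow
    have hmr : 0 ≤ (m : Int) * r := mul_nonneg (Int.natCast_nonneg m) hr.le
    have hrow' : row + ((m : Int) * r + r) = (s.length : Int) := by
      push_cast at hrow; linarith [hrow, (by ring : ((m : Int) + 1) * r = (m : Int) * r + r)]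
    have hlt : row < (s.length : Int) := by linarith
    rw [pvTspInner, dif_pos ⟨hlt, hr⟩, ih (row + r) col _ (by linarith) (by push_cast; linarith)]
    rw [List.range_succ_eq_map, List.map_cons, List.map_map]
    simp only [Nat.cast_zero, zero_mul, add_zero, List.append_assoc, List.singleton_append]
    congr 2
    apply List.map_congr_left
    intro j hj
    simp only [Function.comp_apply, Nat.succ_eq_add_one]
    congr 1
    push_cast
    ring

lemma pvTspOuter_eq (s : List Char) (r : Int) (hr : 0 < r) (c : Nat)
    (hL : (s.length : Int) = (c : Int) * r) :
    ∀ (n : Nat) (col : Int) (acc : List Char), 0 ≤ col → col + (n : Int) = r →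
    pvTspOuter s (s.length : Int) r col acc
      = acc ++ (List.range n).flatMap (fun (k : Nat) => pvColTD s r c (col + (k : Int))) := by
  intro n
  induction n with
  | zero =>
    intro col acc h0 hcol
    rw [pvTspOuter]
    have hnot : ¬ col < r := by push_cast at hcol; omega
    simp [hnot]
  | succ n ih =>
    intro col acc h0 hcol
    have hlt : col < r := by push_cast at hcol; omega
    rw [pvTspOuter, dif_pos hlt,
        pvTspInner_eq s r hr c 0 col [] le_rfl (by simpa using hL.symm),
        ih (col + 1) _ (by omega) (by push_cast at hcol ⊢; omega)]
    rw [List.range_succ_eq_map, List.flatMap_cons, List.flatMap_map]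
    have hfun : (fun a : Nat => pvColTD s r c (col + 1 + (a : Int)))
        = fun a : Nat => pvColTD s r c (col + ((a.succ : Nat) : Int)) := by
      funext a; congr 1; push_cast; ring
    rw [hfun]
    simp only [List.nil_append, List.append_assoc]
    congr 2

lemma pvBlock_extract {α β : Type} (c : Nat) (f : β → List α) :
    ∀ (xs : List β) (m : Nat) (hm : m < xs.length), (∀ x ∈ xs, (f x).length = c) →
    ((xs.flatMap f).drop (m * c)).take c = f xs[m] := by
  intro xs
  induction xs with
  | nil => intro m hm; simp at hm
  | cons x xs ih =>
    intro m hm hf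
    have hx : (f x).length = c := hf x (List.mem_cons_self)
    cases m with
    | zero =>
      simp only [List.flatMap_cons, Nat.zero_mul, List.drop_zero, List.getElem_cons_zero]
      exact List.take_left' hx
    | succ m =>
      have hstep : (m + 1) * c = c + m * c := by ring
      rw [List.flatMap_cons, List.getElem_cons_succ, hstep, ← List.drop_drop, ← hx,
          List.drop_left, hx]
      exact ih m (by simpa using hm) (fun y hy => hf y (List.mem_cons_of_mem _ hy))

lemma pvPyRange_countdown (c : Nat) :
    PySem.List.pyRange ((c : Int) - 1) (-1) (-1) = (List.range c).map (fun (k : Nat) => (c : Int) - 1 - (k : Int)) := by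
  rcases Nat.eq_zero_or_pos c with hc | hc
  · subst hc; simp [PySem.List.pyRange]
  · have h1 : (-1 : Int) < (c : Int) - 1 := by omega
    have h2 : ((c : Int) - 1 - (-1) + -(-1) - 1) / -(-1) = (c : Int) := by
      norm_num
    simp only [PySem.List.pyRange, if_neg (by norm_num : ¬ (-1 : Int) = 0),
      if_neg (by norm_num : ¬ (0 : Int) < -1), if_pos h1, h2, Int.toNat_natCast]
    apply List.map_congr_left
    intro k hk
    ring

-- B's bottom-to-top column is the reverse of the top-to-bottom column
lemma pvColUp_eq (p : List Char) (r : Int) (c : Nat) (i : Int) :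
    pvColUp p r ((c : Int)) i = (pvColTD p r c i).reverse := by
  unfold pvColUp pvColTD
  rw [pvPyRange_countdown c, List.map_map]
  apply List.ext_getElem (by simp)
  intro k h1 h2
  simp only [List.getElem_map, List.getElem_reverse, List.length_map, List.length_range,
    List.getElem_range, Function.comp_apply]
  have hk : k < c := by simpa using h1
  have hcast : ((c - 1 - k : Nat) : Int) = (c : Int) - 1 - (k : Int) := by omega
  congr 1
  rw [hcast]
  ring

-- A's slice of the reversed transposed puzzle is B's column
lemma pvSlice_eq_col (p : List Char) (r : Int) (hr : 0 < r) (c : Nat)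
    (hL : p.length = c * r.toNat) (i : Nat) (hi : i < r.toNat) :
    PySem.List.slice (reverse_string (transpose_string p r))
        (some ((p.length : Int) - (c : Int) - (i : Int) * (c : Int)))
        (some ((p.length : Int) - (i : Int) * (c : Int)))
      = pvColUp p r (c : Int) (i : Int) := by
  have hrn : ((r.toNat : Nat) : Int) = r := Int.toNat_of_nonneg hr.le
  set rn := r.toNat with hrdef
  have hLi : (p.length : Int) = (c : Int) * r := by
    rw [hL]; push_cast [← hrn]; ring
  have htsp : transpose_string p r
      = (List.range rn).flatMap (fun (k : Nat) => pvColTD p r c ((k : Int))) := by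
    have := pvTspOuter_eq p r hr c hLi rn 0 [] le_rfl (by rw [hrn]; ring)
    rw [transpose_string, this]
    simp
  have hrev : reverse_string (transpose_string p r)
      = (List.range rn).reverse.flatMap
          (fun (k : Nat) => (pvColTD p r c ((k : Int))).reverse) := by
    rw [reverse_string, pvRevLoop_eq _ _ 0 [] rfl, htsp, List.reverse_flatMap]
    simp only [List.drop_zero, List.nil_append]
    rfl
  have hcast : ((rn - 1 - i : Nat) : Int) = (rn : Int) - 1 - (i : Int) := by omega
  have e1 : (p.length : Int) - (c : Int) - (i : Int) * (c : Int) = (((rn - 1 - i) * c : Nat) : Int) := by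
    push_cast [hL, hcast]
    have : ((rn : Nat) : Int) = (rn : Int) := rfl
    ring
  have e2 : (p.length : Int) - (i : Int) * (c : Int) = ((((rn - 1 - i) * c + c : Nat)) : Int) := by
    push_cast [hL, hcast]
    ring
  rw [hrev, e1, e2, PySem.List.slice_natCast]
  have e3 : (rn - 1 - i) * c + c - (rn - 1 - i) * c = c := by omega
  rw [e3]
  have hm : rn - 1 - i < ((List.range rn).reverse).length := by simp; omega
  rw [pvBlock_extract c _ ((List.range rn).reverse) (rn - 1 - i) hm
      (by intro x hx; simp [pvColTD])]
  have hidx : ((List.range rn).reverse)[rn - 1 - i] = i := by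
    rw [List.getElem_reverse]
    simp only [List.length_range, List.getElem_range]
    omega
  rw [hidx, pvColUp_eq]

def pvMatch (word : List Char) (col_num : Int) (res : Int × List Char) : Option String :=
  if PySem.Chars.find res.2 word ≠ -1 then
    some (pvFmt word (col_num - 1 - PySem.Chars.find res.2 word) res.1)
  else none

lemma pvLoops_eq (p word : List Char) (r : Int) (hr : 0 < r) (c : Nat)
    (hL : p.length = c * r.toNat) :
    ∀ (n : Nat) (i0 : Int) (puz : List Char), 0 ≤ i0 → i0 + (n : Int) = r →
    (n = 0 → PySem.Chars.find puz word = -1) →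
    pvMatch word (c : Int) (pvFindLoop (reverse_string (transpose_string p r)) word (p.length : Int) (c : Int) r i0 puz)
      = pvAltLoop p word r (c : Int) (PySem.List.pyRange i0 r 1) := by
  intro n
  induction n with
  | zero =>
    intro i0 puz h0 hir hinv
    have hie : i0 = r := by push_cast at hir; omega
    have hnot : ¬ i0 < r := by omega
    have hrange : PySem.List.pyRange i0 r 1 = [] := by
      rw [PySem.List.pyRange_of_pos _ _ Int.one_pos, if_neg hnot]
      simp
    rw [pvFindLoop, dif_neg hnot, hrange]
    simp [pvMatch, pvAltLoop, hinv rfl]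
  | succ n ih =>
    intro i0 puz h0 hir hinv
    have hlt : i0 < r := by push_cast at hir; omega
    have hi0 : i0 = ((i0.toNat : Nat) : Int) := (Int.toNat_of_nonneg h0).symm
    have hitn : i0.toNat < r.toNat := by omega
    have hcol := pvSlice_eq_col p r hr c hL i0.toNat hitn
    rw [← hi0] at hcol
    rw [pvFindLoop, dif_pos hlt]
    simp only [hcol]
    rw [PySem.List.pyRange_one_cons hlt]
    by_cases hf : PySem.Chars.find (pvColUp p r (c : Int) i0) word = -1
    · simp only [pvAltLoop, hf, ne_eq, not_true_eq_false, Bool.false_eq_true, if_false, ite_false,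
        not_false_eq_true, if_neg]
      rw [ih (i0 + 1) _ (by omega) (by push_cast at hir ⊢; omega) (fun _ => hf)]
    · simp [pvAltLoop, pvMatch, hf]

-- ===== VERDICT (by name: the statement is the Claim_ definition above) =====
theorem find_word_up_spec : Claim_equal_find_word_up := by
  intro puzzle word row_len _ hpre
  rcases hpre with ⟨hr, hmod⟩
  unfold Spec_find_word_up
  have hdvd : row_len ∣ (puzzle.toList.length : Int) := by
    rw [PySem.Str.len_eq] at hmod
    exact (PySem.Int.mod_eq_zero_iff_dvd _ _).mp hmod
  have hrn : ((row_len.toNat : Nat) : Int) = row_len := Int.toNat_of_nonneg hr.le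
  have hdvdn : row_len.toNat ∣ puzzle.toList.length := by
    rwa [← hrn, Int.natCast_dvd_natCast] at hdvd
  have hL : puzzle.toList.length = (puzzle.toList.length / row_len.toNat) * row_len.toNat :=
    (Nat.div_mul_cancel hdvdn).symm
  have hcn : PySem.Int.floordiv ((PySem.Str.len puzzle : Int)) row_len
      = ((puzzle.toList.length / row_len.toNat : Nat) : Int) := by
    rw [PySem.Str.len_eq, ← hrn, PySem.Int.floordiv_natCast]
    simp
  have hrnpos : row_len.toNat ≠ 0 := by omega
  have hmain := pvLoops_eq puzzle.toList word.toList row_len hr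
    (puzzle.toList.length / row_len.toNat) hL row_len.toNat 0 [] le_rfl
    (by simpa using hrn) (fun h => absurd h hrnpos)
  rw [find_word_up_alt, if_neg (by omega : ¬ row_len = 0),
      if_neg (by push_neg; exact ⟨by omega, hmod⟩)]
  rw [find_word_up]
  simp only [PySem.Str.len_eq] at hcn
  simp only [PySem.Str.len_eq, hcn] at hmain ⊢
  exact hmain
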